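-- pv_equiv track=rewrite | github.com/slubi/Information_Security_2 | GUI2.py | AsciiToBit
-- ===== SOURCE A (Python) =====
-- def AsciiToBit(string:str):
--     string_bit:list[str]=[]
--     for i in range(0,len(string),2):
--         char_byte1=bin(ord(string[i]))
--         char_byte1=char_byte1[2:]#去标志位"0b"
--         char_byte1=(8-len(char_byte1))*"0"+char_byte1#补零
--         char_byte2=bin(ord(string[i+1]))
--         char_byte2=char_byte2[2:]#去标志位"0b"
--         char_byte2=(8-len(char_byte2))*"0"+char_byte2#补零
--         string_bit.append(char_byte1+char_byte2)
--     return string_bit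
-- ===== SOURCE B (Python) =====
-- def AsciiToBit(string: str):
--     result = []
--     i = 0
--     n = len(string)
--     while i < n:
--         v = ord(string[i]) * 256 + ord(string[i + 1])
--         result.append(''.join('1' if (v >> (15 - k)) & 1 else '0' for k in range(16)))
--         i += 2
--     return result
-- ===== Notes on version B (the rewrite author's own statement) =====
-- stated objective: alternative
-- what changed: Instead of formatting each character separately (bin(), strip the prefix, pad to 8, concatenate two strings), B combines each character pair into one 16-bit integer ord(c1)*256+ord(c2) in a while loop and reads its 16 bits off directly by shift-and-mask; no binary-string formatting or padding occurs at all.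
import Mathlib
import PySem

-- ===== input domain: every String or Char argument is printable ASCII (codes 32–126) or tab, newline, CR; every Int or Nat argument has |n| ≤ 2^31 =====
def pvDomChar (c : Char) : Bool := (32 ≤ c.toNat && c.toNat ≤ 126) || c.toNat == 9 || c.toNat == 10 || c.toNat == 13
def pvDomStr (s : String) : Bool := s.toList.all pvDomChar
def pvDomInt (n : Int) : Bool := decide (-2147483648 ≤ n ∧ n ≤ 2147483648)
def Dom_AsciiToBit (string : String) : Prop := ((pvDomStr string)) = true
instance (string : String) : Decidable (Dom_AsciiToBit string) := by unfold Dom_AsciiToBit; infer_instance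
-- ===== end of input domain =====

-- B replaces A's per-character string formatting (bin(), strip the two-char prefix, pad,
-- concatenate two 8-bit strings) by arithmetic bit extraction: each pair of characters is
-- combined into one 16-bit integer ord(c1)*256+ord(c2) and its 16 bits are read off by
-- shift-and-mask in a while loop; same cost, different method (objective: alternative).

-- ===== PORT A =====
-- binary digits of m, most significant first (empty for 0)
def pvBinDigits : Nat → List Char
  | 0 => []
  | n + 1 => pvBinDigits ((n + 1) / 2) ++ [if (n + 1) % 2 = 1 then '1' else '0']
decreasing_by exact Nat.div_lt_self (Nat.succ_pos n) (by omega)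

-- Python bin(m) for m ≥ 0: the two-character binary prefix then the digits (one zero digit for m = 0)
def pvBin (m : Nat) : List Char := '0' :: 'b' :: (if m = 0 then ['0'] else pvBinDigits m)

def AsciiToBit (string : String) : List String :=
  let s := string.toList
  (PySem.List.pyRange 0 (PySem.Str.len string) 2).foldl (fun string_bit i =>
    let char_byte1a := pvBin (PySem.List.pyGetD s i ' ').toNat          -- bin(ord(string[i]))
    let char_byte1b := PySem.List.slice char_byte1a (some 2) none        -- [2:]
    let char_byte1 := List.replicate (8 - char_byte1b.length) '0' ++ char_byte1b  -- pad
    let char_byte2a := pvBin (PySem.List.pyGetD s (i + 1) ' ').toNat    -- bin(ord(string[i+1]))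
    let char_byte2b := PySem.List.slice char_byte2a (some 2) none        -- [2:]
    let char_byte2 := List.replicate (8 - char_byte2b.length) '0' ++ char_byte2b  -- pad
    string_bit ++ [String.ofList (char_byte1 ++ char_byte2)]) []

-- ===== PORT B =====
-- ''.join('1' if (v >> (15 - k)) & 1 else '0' for k in range(16))
def pvBits16 (v : Nat) : String :=
  String.ofList ((List.range 16).map (fun k => if (v >>> (15 - k)) &&& 1 ≠ 0 then '1' else '0'))

-- the while loop 'while i < n: … i += 2' (i stays ≥ 0 in Python, so i : Nat);
-- string[i]/string[i+1] via pyGetD (the out-of-range case is excluded by Pre_)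
def pvAltGo (s : List Char) (i : Nat) (acc : List String) : List String :=
  if _h : i < s.length then
    pvAltGo s (i + 2)
      (acc ++ [pvBits16 ((PySem.List.pyGetD s (i : Int) ' ').toNat * 256
                          + (PySem.List.pyGetD s ((i : Int) + 1) ' ').toNat)])
  else acc
termination_by s.length - i
decreasing_by omega

def AsciiToBit_alt (string : String) : List String :=
  pvAltGo string.toList 0 []

-- ===== PRECONDITION & SPEC =====
-- Pre_ excludes odd-length strings, on which A (and B) raise IndexError at the last pair.
def Pre_AsciiToBit (string : String) : Prop := string.toList.length % 2 = 0
instance (string : String) : Decidable (Pre_AsciiToBit string) := by unfold Pre_AsciiToBit; infer_instance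
def pvWitness_AsciiToBit : String := "ab"

def Spec_AsciiToBit (string : String) (out : List String) : Prop := out = AsciiToBit_alt string
instance (string : String) (out : List String) : Decidable (Spec_AsciiToBit string out) := by unfold Spec_AsciiToBit; infer_instance

-- ===== CLAIM (what is proved, stated in full; the proofs are below) =====
def Claim_equal_AsciiToBit : Prop := ∀ (string : String), Dom_AsciiToBit string → Pre_AsciiToBit string → Spec_AsciiToBit string (AsciiToBit string)

-- ===== LEMMAS AND PROOFS =====

-- step-2 range: induction forms
lemma pyRange2_nil (a b : Int) (h : b ≤ a) : PySem.List.pyRange a b 2 = [] := by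
  rw [PySem.List.pyRange_of_pos _ _ (by norm_num : (0:Int) < 2)]
  have : ¬ a < b := by omega
  simp [this]

lemma pyRange2_cons (a b : Int) (h : a < b) :
    PySem.List.pyRange a b 2 = a :: PySem.List.pyRange (a + 2) b 2 := by
  rw [PySem.List.pyRange_of_pos _ _ (by norm_num : (0:Int) < 2),
      PySem.List.pyRange_of_pos _ _ (by norm_num : (0:Int) < 2)]
  by_cases h2 : a + 2 < b
  · have hm : ((b - a + 2 - 1) / 2).toNat = ((b - (a + 2) + 2 - 1) / 2).toNat + 1 := by omega
    rw [if_pos h, if_pos h2, hm, List.range_succ_eq_map, List.map_cons, List.map_map]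
    congr 1
    · simp
    · refine List.map_congr_left ?_
      intro k _
      simp only [Function.comp_apply]
      push_cast
      ring
  · have hm : ((b - a + 2 - 1) / 2).toNat = 1 := by omega
    rw [if_pos h, if_neg h2, hm]
    simp

-- padding pvBinDigits m to n digits yields the n shift-and-mask bits, msb first
lemma bits_pad : ∀ (n m : Nat), m < 2 ^ n →
    List.replicate (n - (pvBinDigits m).length) '0' ++ pvBinDigits m
    = (List.range n).map (fun k => if (m >>> (n - 1 - k)) &&& 1 ≠ 0 then '1' else '0') := by
  intro n
  induction n with
  | zero =>
    intro m hm
    have : m = 0 := by omega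
    subst this
    simp [pvBinDigits]
  | succ n ih =>
    intro m hm
    by_cases h0 : m = 0
    · subst h0
      simp [pvBinDigits, Nat.zero_shiftRight, List.map_const']
    · obtain ⟨m', rfl⟩ := Nat.exists_eq_succ_of_ne_zero h0
      rw [pvBinDigits]
      have hq : (m' + 1) / 2 < 2 ^ n := by
        have h2 : 2 ^ (n + 1) = 2 * 2 ^ n := by rw [pow_succ]; ring
        omega
      have hlen : n + 1 - ((pvBinDigits ((m' + 1) / 2)).length + 1)
          = n - (pvBinDigits ((m' + 1) / 2)).length := by omega
      rw [List.length_append, List.length_singleton, hlen, ← List.append_assoc,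
          ih _ hq, List.range_succ, List.map_append, List.map_singleton]
      congr 1
      · refine List.map_congr_left ?_
        intro k hk
        have hkn : k < n := List.mem_range.mp hk
        have hsh : n + 1 - 1 - k = 1 + (n - 1 - k) := by omega
        rw [hsh, Nat.shiftRight_add, Nat.shiftRight_one]
      · have hsh : n + 1 - 1 - n = 0 := by omega
        rw [hsh, Nat.shiftRight_zero, Nat.and_one_is_mod]
        rcases Nat.mod_two_eq_zero_or_one (m' + 1) with h | h <;> simp [h]

-- A's bin/strip/pad of one byte equals the shift-and-mask bits
lemma pad_eq : ∀ m : Nat, m < 256 →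
    List.replicate (8 - (PySem.List.slice (pvBin m) (some 2) none).length) '0' ++
      PySem.List.slice (pvBin m) (some 2) none
    = (List.range 8).map (fun k => if (m >>> (7 - k)) &&& 1 ≠ 0 then '1' else '0') := by
  intro m hm
  have hs : PySem.List.slice (pvBin m) (some 2) none
      = (if m = 0 then ['0'] else pvBinDigits m) := by
    rw [PySem.List.slice_from _ (by norm_num)]
    simp [pvBin]
  rw [hs]
  by_cases h0 : m = 0
  · subst h0
    rw [if_pos rfl]
    have h1 : List.replicate (8 - List.length ['0']) '0' ++ ['0']
        = List.replicate (8 - (pvBinDigits 0).length) '0' ++ pvBinDigits 0 := by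
      simp [pvBinDigits]
    rw [h1, bits_pad 8 0 (by norm_num)]
  · rw [if_neg h0]
    exact bits_pad 8 m (by omega)

-- bit j+8 of a*256+b is bit j of a (b < 256)
lemma bit_high (a b j : Nat) (hb : b < 256) :
    ((a * 256 + b) >>> (8 + j)) &&& 1 = (a >>> j) &&& 1 := by
  simp only [Nat.shiftRight_eq_div_pow, Nat.and_one_is_mod, pow_add]
  have h28 : (2:Nat) ^ 8 = 256 := by norm_num
  rw [h28, ← Nat.div_div_eq_div_mul]
  congr 2
  omega

-- bit j (j < 8) of a*256+b is bit j of b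
lemma bit_low (a b j : Nat) (hj : j < 8) :
    ((a * 256 + b) >>> j) &&& 1 = (b >>> j) &&& 1 := by
  simp only [Nat.shiftRight_eq_div_pow, Nat.and_one_is_mod]
  have h : (256:Nat) = 2 ^ j * (2 * 2 ^ (7 - j)) := by
    have e : j + (7 - j) + 1 = 8 := by omega
    calc (256:Nat) = 2 ^ (j + (7 - j) + 1) := by rw [e]; decide
    _ = 2 ^ j * (2 * 2 ^ (7 - j)) := by rw [pow_succ, pow_add]; ring
  have key : a * 256 + b = b + (2 * (a * 2 ^ (7 - j))) * 2 ^ j := by rw [h]; ring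
  rw [key, Nat.add_mul_div_right _ _ (by positivity : 0 < 2 ^ j)]
  omega

-- the two padded bytes concatenated are the 16 bits of a*256+b
lemma pair_bits (a b : Nat) (hb : b < 256) :
    ((List.range 8).map (fun k => if (a >>> (7 - k)) &&& 1 ≠ 0 then '1' else '0')) ++
    ((List.range 8).map (fun k => if (b >>> (7 - k)) &&& 1 ≠ 0 then '1' else '0'))
    = (List.range 16).map (fun k => if ((a * 256 + b) >>> (15 - k)) &&& 1 ≠ 0 then '1' else '0') := by
  have h16 : (16 : Nat) = 8 + 8 := by norm_num
  rw [h16, List.range_add, List.map_append, List.map_map]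
  refine congrArg₂ (· ++ ·) ?_ ?_
  · refine List.map_congr_left ?_
    intro k hk
    have hk8 : k < 8 := List.mem_range.mp hk
    have h15 : 15 - k = 8 + (7 - k) := by omega
    rw [h15, bit_high a b (7 - k) hb]
  · refine List.map_congr_left ?_
    intro k hk
    have hk8 : k < 8 := List.mem_range.mp hk
    simp only [Function.comp_apply]
    have h15 : 15 - (8 + k) = 7 - k := by omega
    rw [h15, bit_low a b (7 - k) (by omega)]

-- elements of a Dom-string have codes < 256
lemma dom_lt (s : String) (hd : Dom_AsciiToBit s) : ∀ c ∈ s.toList, c.toNat < 256 := by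
  intro c hc
  unfold Dom_AsciiToBit pvDomStr at hd
  have := List.all_eq_true.mp hd c hc
  unfold pvDomChar at this
  simp only [Bool.or_eq_true, Bool.and_eq_true, decide_eq_true_eq, beq_iff_eq] at this
  omega

-- one pair of A's loop body equals one pvBits16 of B
lemma head_eq (s : List Char) (j : Int) (h0 : 0 ≤ j) (h1 : j + 1 < (s.length : Int))
    (hlt : ∀ c ∈ s, c.toNat < 256) :
    String.ofList
      ((List.replicate (8 - (PySem.List.slice (pvBin (PySem.List.pyGetD s j ' ').toNat) (some 2) none).length) '0' ++
        PySem.List.slice (pvBin (PySem.List.pyGetD s j ' ').toNat) (some 2) none) ++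
       (List.replicate (8 - (PySem.List.slice (pvBin (PySem.List.pyGetD s (j + 1) ' ').toNat) (some 2) none).length) '0' ++
        PySem.List.slice (pvBin (PySem.List.pyGetD s (j + 1) ' ').toNat) (some 2) none))
    = pvBits16 ((PySem.List.pyGetD s j ' ').toNat * 256 + (PySem.List.pyGetD s (j + 1) ' ').toNat) := by
  have ha : (PySem.List.pyGetD s j ' ').toNat < 256 := by
    rw [PySem.List.pyGetD_eq_getElem s ' ' h0 (by omega)]
    exact hlt _ (List.getElem_mem _)
  have hb : (PySem.List.pyGetD s (j + 1) ' ').toNat < 256 := by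
    rw [PySem.List.pyGetD_eq_getElem s ' ' (by omega) h1]
    exact hlt _ (List.getElem_mem _)
  unfold pvBits16
  rw [pad_eq _ ha, pad_eq _ hb, pair_bits _ _ hb]

-- the while loop equals A's range(0, n, 2) fold, generalized over the loop index
lemma loop_eq (s : List Char) (hlt : ∀ c ∈ s, c.toNat < 256) (hev : s.length % 2 = 0) :
    ∀ (fuel i : Nat) (acc : List String), s.length ≤ i + fuel → i % 2 = 0 →
    (PySem.List.pyRange (i : Int) (s.length : Int) 2).foldl
      (fun string_bit j =>
        string_bit ++ [String.ofList
          ((List.replicate (8 - (PySem.List.slice (pvBin (PySem.List.pyGetD s j ' ').toNat) (some 2) none).length) '0' ++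
            PySem.List.slice (pvBin (PySem.List.pyGetD s j ' ').toNat) (some 2) none) ++
           (List.replicate (8 - (PySem.List.slice (pvBin (PySem.List.pyGetD s (j + 1) ' ').toNat) (some 2) none).length) '0' ++
            PySem.List.slice (pvBin (PySem.List.pyGetD s (j + 1) ' ').toNat) (some 2) none))]) acc
    = pvAltGo s i acc := by
  intro fuel
  induction fuel with
  | zero =>
    intro i acc hle _
    have hge : s.length ≤ i := by omega
    rw [pyRange2_nil _ _ (by exact_mod_cast hge), pvAltGo, dif_neg (by omega)]
    rfl
  | succ n ih =>
    intro i acc hle hev2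
    by_cases hlt2 : i < s.length
    · have hj1 : (i : Int) + 1 < (s.length : Int) := by
        have : i + 1 < s.length := by omega
        exact_mod_cast this
      rw [pyRange2_cons _ _ (by exact_mod_cast hlt2), List.foldl_cons]
      have hcast : ((i : Int) + 2) = ((i + 2 : Nat) : Int) := by push_cast; ring
      rw [hcast, ih (i + 2) _ (by omega) (by omega)]
      conv_rhs => rw [pvAltGo]
      rw [dif_pos hlt2]
      exact congrArg (pvAltGo s (i + 2))
        (by rw [head_eq s (i : Int) (by exact_mod_cast Nat.zero_le i) hj1 hlt])
    · have hge : s.length ≤ i := by omega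
      rw [pyRange2_nil _ _ (by exact_mod_cast hge), pvAltGo, dif_neg (by omega)]
      rfl

-- ===== VERDICT (by name: the statement is the Claim_ definition above) =====
theorem AsciiToBit_spec : Claim_equal_AsciiToBit := by
  intro s hd hpre
  unfold Spec_AsciiToBit AsciiToBit AsciiToBit_alt
  simp only [PySem.Str.len_eq]
  exact loop_eq s.toList (dom_lt s hd) hpre s.toList.length 0 [] (by omega) (by omega)
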